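-- pv_equiv track=rewrite | github.com/Jamal135/AoC-2023 | puzzles/day9.py | compute_next_value
-- ===== SOURCE A (Python) =====
-- from typing import List
--
-- def compute_next_value(pattern_data: List[List[int]], forward: bool = True) -> int:
--     if forward: # Compute next value in sequence.
--         return sum(pattern[-1] for pattern in pattern_data)
--     else: # Compute previous value in sequence.
--         value = 0
--         for pattern in pattern_data[::-1]:
--             value = pattern[0] - value
--         return value
-- ===== SOURCE B (Python) =====
-- def compute_next_value(pattern_data, forward=True):
--     # One pass over enumerate(pattern_data): forward adds last elements,
--     # backward adds a closed-form alternating sum of first elements.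
--     return sum(p[-1] if forward else (-1) ** k * p[0]
--                for k, p in enumerate(pattern_data))
-- ===== Notes on version B (the rewrite author's own statement) =====
-- stated objective: alternative
-- what changed: The backward accumulator recurrence value = pattern[0] - value over the reversed list is replaced by a direct closed-form alternating sum (-1)**k * p[0] computed in a single enumerate pass that also covers the forward branch, so the list reversal and the fold state disappear.
import Mathlib
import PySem

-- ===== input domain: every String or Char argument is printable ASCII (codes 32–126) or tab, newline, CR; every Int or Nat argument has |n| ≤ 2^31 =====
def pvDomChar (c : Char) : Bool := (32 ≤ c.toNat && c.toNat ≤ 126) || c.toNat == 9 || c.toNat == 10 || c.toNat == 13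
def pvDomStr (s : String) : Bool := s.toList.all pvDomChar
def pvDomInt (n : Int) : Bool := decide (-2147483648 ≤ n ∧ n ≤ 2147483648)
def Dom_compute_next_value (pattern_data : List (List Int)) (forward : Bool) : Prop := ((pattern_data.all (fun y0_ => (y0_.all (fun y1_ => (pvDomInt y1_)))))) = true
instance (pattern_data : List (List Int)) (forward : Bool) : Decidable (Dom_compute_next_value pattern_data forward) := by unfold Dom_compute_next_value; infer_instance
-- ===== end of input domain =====

-- B replaces the backward reversed-fold recurrence by a closed-form alternating sum in one enumerate pass (alternative decomposition, same cost).
-- ===== PORT A =====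
def compute_next_value (pattern_data : List (List Int)) (forward : Bool) : Int :=
  if forward then
    -- sum(pattern[-1] for pattern in pattern_data); Pre_ guarantees every row is nonempty
    pattern_data.foldl (fun acc p => acc + PySem.List.pyGetD p (-1) 0) 0
  else
    -- for pattern in pattern_data[::-1]: value = pattern[0] - value
    ((PySem.List.slice? pattern_data none none (-1)).getD []).foldl
      (fun value p => PySem.List.pyGetD p 0 0 - value) 0

-- ===== PORT B =====
def compute_next_value_alt (pattern_data : List (List Int)) (forward : Bool) : Int :=
  (PySem.List.enumerate pattern_data).foldl
    (fun acc kp =>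
      acc + (if forward then PySem.List.pyGetD kp.2 (-1) 0
             else (-1 : Int) ^ kp.1.toNat * PySem.List.pyGetD kp.2 0 0)) 0

-- ===== PRECONDITION & SPEC =====
-- Pre_ excludes exactly the inputs with an empty row, on which Python A raises IndexError.
def Pre_compute_next_value (pattern_data : List (List Int)) (forward : Bool) : Prop :=
  ∀ p ∈ pattern_data, p ≠ []
instance (pattern_data : List (List Int)) (forward : Bool) : Decidable (Pre_compute_next_value pattern_data forward) := by unfold Pre_compute_next_value; infer_instance
def pvWitness_compute_next_value : List (List Int) × Bool := ([[1, 2], [3]], false)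

def Spec_compute_next_value (pattern_data : List (List Int)) (forward : Bool) (out : Int) : Prop := out = compute_next_value_alt pattern_data forward
instance (pattern_data : List (List Int)) (forward : Bool) (out : Int) : Decidable (Spec_compute_next_value pattern_data forward out) := by unfold Spec_compute_next_value; infer_instance

-- ===== CLAIM (what is proved, stated in full; the proofs are below) =====
def Claim_equal_compute_next_value : Prop := ∀ (pattern_data : List (List Int)) (forward : Bool), Dom_compute_next_value pattern_data forward → Pre_compute_next_value pattern_data forward → Spec_compute_next_value pattern_data forward (compute_next_value pattern_data forward)

-- ===== LEMMAS AND PROOFS =====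

-- Forward: the enumerate fold ignores the index, so it equals A's plain fold.
theorem pv_enum_fold_fwd (f : List Int → Int) :
    ∀ (xs : List (List Int)) (s : Int) (acc : Int),
      (PySem.List.enumerate xs s).foldl (fun a kp => a + f kp.2) acc
        = xs.foldl (fun a p => a + f p) acc := by
  intro xs
  induction xs with
  | nil => intro s acc; simp [PySem.List.enumerate_nil]
  | cons x t ih => intro s acc; simp [PySem.List.enumerate_cons, List.foldl, ih]

-- Backward: the enumerate alternating sum equals the foldr difference chain.
theorem pv_enum_fold_bwd (f : List Int → Int) :
    ∀ (xs : List (List Int)) (s : Nat) (acc : Int),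
      (PySem.List.enumerate xs (s : Int)).foldl
          (fun a kp => a + (-1 : Int) ^ kp.1.toNat * f kp.2) acc
        = acc + (-1 : Int) ^ s * xs.foldr (fun p v => f p - v) 0 := by
  intro xs
  induction xs with
  | nil => intro s acc; simp [PySem.List.enumerate_nil]
  | cons x t ih =>
    intro s acc
    have hcast : (s : Int) + 1 = ((s + 1 : Nat) : Int) := by push_cast; ring
    simp only [PySem.List.enumerate_cons, List.foldl, List.foldr, hcast, ih]
    have : ((s : Int)).toNat = s := by omega
    rw [this]
    ring

theorem compute_next_value_spec_aux :
    ∀ (pattern_data : List (List Int)) (forward : Bool),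
      compute_next_value pattern_data forward
        = compute_next_value_alt pattern_data forward := by
  intro pd fw
  cases fw with
  | true =>
    simp only [compute_next_value, compute_next_value_alt]
    exact (pv_enum_fold_fwd (fun p => PySem.List.pyGetD p (-1) 0) pd 0 0).symm
  | false =>
    simp only [compute_next_value, compute_next_value_alt, reduceIte]
    rw [PySem.List.slice?_none_none_neg_one, Option.getD_some, List.foldl_reverse]
    have h := pv_enum_fold_bwd (fun p => PySem.List.pyGetD p 0 0) pd 0 0
    simp only [Nat.cast_zero, pow_zero, one_mul, zero_add] at h
    exact h.symm

-- ===== VERDICT (by name: the statement is the Claim_ definition above) =====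
theorem compute_next_value_spec : Claim_equal_compute_next_value := by
  intro pd fw _ _
  exact compute_next_value_spec_aux pd fw
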